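-- pv_equiv track=rewrite | github.com/posl/comment_recommendation | script/split_gen/3_time/en/170_C/8.py | get_nearest_number
-- ===== SOURCE A (Python) =====
-- def get_nearest_number(x, n, p):
--     if n == 0:
--         return x
--     else:
--         # 1 <= p_i <= 100
--         # 1 <= X <= 100
--         # 0 <= N <= 100
--         # so, 0 <= d <= 200
--         d = 200
--         for i in range(1, 101):
--             if i not in p:
--                 if abs(x - i) < d:
--                     d = abs(x - i)
--                     nearest_number = i
--         return nearest_number
-- ===== SOURCE B (Python) =====
-- def get_nearest_number(x, n, p):
--     if n == 0:
--         return x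
--     # expand outward from x by distance; lower side first so ties go to the
--     # smaller candidate. 'nearest' stays unassigned when every candidate
--     # 1..100 is excluded or farther than 199 (outside Pre_).
--     for d in range(0, 200):
--         found = None
--         if 1 <= x - d <= 100 and (x - d) not in p:
--             found = x - d
--         elif 1 <= x + d <= 100 and (x + d) not in p:
--             found = x + d
--         if found is not None:
--             nearest = found
--             break
--     return nearest
-- ===== Notes on version B (the rewrite author's own statement) =====
-- stated objective: alternative
-- what changed: Replaces the full ascending argmin scan over 1..100 with an outward expansion from x by distance (lower side first), returning the first admissible candidate found.
import Mathlib
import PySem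

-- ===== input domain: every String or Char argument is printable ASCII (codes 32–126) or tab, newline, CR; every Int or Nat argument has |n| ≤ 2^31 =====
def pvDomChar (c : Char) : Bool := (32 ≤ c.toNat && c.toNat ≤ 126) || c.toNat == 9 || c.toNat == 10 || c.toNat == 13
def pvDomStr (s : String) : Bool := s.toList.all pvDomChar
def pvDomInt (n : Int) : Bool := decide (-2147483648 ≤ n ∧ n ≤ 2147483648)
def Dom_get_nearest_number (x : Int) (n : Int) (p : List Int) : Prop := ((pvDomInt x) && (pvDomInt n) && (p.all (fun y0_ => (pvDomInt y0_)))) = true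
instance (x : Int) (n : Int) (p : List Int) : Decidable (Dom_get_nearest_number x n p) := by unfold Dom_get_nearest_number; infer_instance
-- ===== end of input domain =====

-- B replaces A's full ascending argmin scan over 1..100 by an outward expansion
-- from x by distance (lower side first); same return value on all inputs where A returns.

-- ===== PORT A =====
-- one loop step of A: 'if i not in p: if abs(x-i) < d: d, nearest = abs(x-i), i'
def stepA (x : Int) (p : List Int) (s : Int × Option Int) (i : Int) : Int × Option Int :=
  if i ∉ p then (if |x - i| < s.1 then (|x - i|, some i) else s) else s

def get_nearest_number (x : Int) (n : Int) (p : List Int) : Int :=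
  if n = 0 then x
  else
    -- d = 200; for i in range(1, 101): ... ; return nearest_number
    let res := (PySem.List.pyRange 1 101 1).foldl (stepA x p) (200, none)
    -- 'none' = nearest_number unbound (UnboundLocalError in Python); excluded by Pre_
    res.2.getD 0

-- ===== PORT B =====
-- one step of B's outward search: try x-d, then x+d
def tryAtB (x : Int) (p : List Int) (d : Int) : Option Int :=
  if 1 ≤ x - d ∧ x - d ≤ 100 ∧ x - d ∉ p then some (x - d)
  else if 1 ≤ x + d ∧ x + d ≤ 100 ∧ x + d ∉ p then some (x + d)
  else none

def get_nearest_number_alt (x : Int) (n : Int) (p : List Int) : Int :=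
  if n = 0 then x
  else
    -- for d in range(0, 200): ... break   (first hit wins)
    -- 'none' = nearest unbound (UnboundLocalError in Python); excluded by Pre_
    ((PySem.List.pyRange 0 200 1).findSome? (tryAtB x p)).getD 0

-- ===== PRECONDITION & SPEC =====
-- Pre_ excludes exactly the inputs on which A raises UnboundLocalError: n ≠ 0 while
-- no candidate 1..100 is both outside p and within distance 199 of x (B raises there too).
def Pre_get_nearest_number (x : Int) (n : Int) (p : List Int) : Prop :=
  n = 0 ∨ ∃ i ∈ PySem.List.pyRange 1 101 1, i ∉ p ∧ |x - i| < 200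
instance (x : Int) (n : Int) (p : List Int) : Decidable (Pre_get_nearest_number x n p) := by
  unfold Pre_get_nearest_number; infer_instance

def pvWitness_get_nearest_number : Int × Int × List Int := (50, 1, [50, 51])

def Spec_get_nearest_number (x : Int) (n : Int) (p : List Int) (out : Int) : Prop := out = get_nearest_number_alt x n p
instance (x : Int) (n : Int) (p : List Int) (out : Int) : Decidable (Spec_get_nearest_number x n p out) := by unfold Spec_get_nearest_number; infer_instance

-- ===== CLAIM (what is proved, stated in full; the proofs are below) =====
def Claim_equal_get_nearest_number : Prop := ∀ (x : Int) (n : Int) (p : List Int), Dom_get_nearest_number x n p → Pre_get_nearest_number x n p → Spec_get_nearest_number x n p (get_nearest_number x n p)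

-- ===== LEMMAS AND PROOFS =====

-- "m is the answer": admissible, within 200, and lexicographically (distance, value)-minimal
def BestN (x : Int) (p : List Int) (m : Int) : Prop :=
  1 ≤ m ∧ m ≤ 100 ∧ m ∉ p ∧ |x - m| < 200 ∧
  ∀ j, 1 ≤ j → j ≤ 100 → j ∉ p → (|x - m| < |x - j| ∨ (|x - m| = |x - j| ∧ m ≤ j))

-- characterization of A's argmin fold
lemma foldA_char (x : Int) (p : List Int) :
    ∀ (l : List Int) (d : Int) (r : Option Int) (res : Int × Option Int),
    res = l.foldl (stepA x p) (d, r) →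
    (res.1 ≤ d ∧ (∀ j ∈ l, j ∉ p → res.1 ≤ |x - j|)) ∧
    (res.1 = d → res = (d, r)) ∧
    (res.1 < d → ∃ l1 m l2, l = l1 ++ m :: l2 ∧ m ∉ p ∧ |x - m| = res.1 ∧
        res.2 = some m ∧ ∀ j ∈ l1, j ∉ p → res.1 < |x - j|) := by
  intro l
  induction l with
  | nil =>
      intro d r res hres
      simp [List.foldl] at hres
      subst hres
      refine ⟨⟨le_refl _, by simp⟩, fun _ => rfl, fun h => absurd h (lt_irrefl _)⟩
  | cons a l ih =>
      intro d r res hres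
      simp only [List.foldl] at hres
      by_cases ha : a ∈ p
      · have hstep : stepA x p (d, r) a = (d, r) := by simp [stepA, ha]
        rw [hstep] at hres
        obtain ⟨⟨h1, h2⟩, h3, h4⟩ := ih d r res hres
        refine ⟨⟨h1, ?_⟩, h3, ?_⟩
        · intro j hj hjp
          rcases List.mem_cons.mp hj with h | h
          · exact absurd (h ▸ ha) hjp
          · exact h2 j h hjp
        · intro hlt
          obtain ⟨l1, m, l2, hsplit, hm1, hm2, hm3, hm4⟩ := h4 hlt
          refine ⟨a :: l1, m, l2, by simp [hsplit], hm1, hm2, hm3, ?_⟩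
          intro j hj hjp
          rcases List.mem_cons.mp hj with h | h
          · exact absurd (h ▸ ha) hjp
          · exact hm4 j h hjp
      · by_cases hlt : |x - a| < d
        · have hstep : stepA x p (d, r) a = (|x - a|, some a) := by simp [stepA, ha, hlt]
          rw [hstep] at hres
          obtain ⟨⟨h1, h2⟩, h3, h4⟩ := ih (|x - a|) (some a) res hres
          have hres1d : res.1 < d := lt_of_le_of_lt h1 hlt
          refine ⟨⟨le_of_lt hres1d, ?_⟩, ?_, ?_⟩
          · intro j hj hjp
            rcases List.mem_cons.mp hj with h | h
            · exact h ▸ h1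
            · exact h2 j h hjp
          · intro h; exact absurd h (ne_of_lt hres1d)
          · intro _
            rcases lt_or_eq_of_le h1 with hstrict | heq
            · obtain ⟨l1, m, l2, hsplit, hm1, hm2, hm3, hm4⟩ := h4 hstrict
              refine ⟨a :: l1, m, l2, by simp [hsplit], hm1, hm2, hm3, ?_⟩
              intro j hj hjp
              rcases List.mem_cons.mp hj with h | h
              · exact h ▸ hstrict
              · exact hm4 j h hjp
            · have := h3 heq
              refine ⟨[], a, l, by simp, ha, ?_, ?_, by simp⟩
              · rw [this]
              · rw [this]
        · have hstep : stepA x p (d, r) a = (d, r) := by simp [stepA, ha, hlt]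
          rw [hstep] at hres
          obtain ⟨⟨h1, h2⟩, h3, h4⟩ := ih d r res hres
          have hda : d ≤ |x - a| := not_lt.mp hlt
          refine ⟨⟨h1, ?_⟩, h3, ?_⟩
          · intro j hj hjp
            rcases List.mem_cons.mp hj with h | h
            · exact h ▸ le_trans h1 hda
            · exact h2 j h hjp
          · intro hlt'
            obtain ⟨l1, m, l2, hsplit, hm1, hm2, hm3, hm4⟩ := h4 hlt'
            refine ⟨a :: l1, m, l2, by simp [hsplit], hm1, hm2, hm3, ?_⟩
            intro j hj hjp
            rcases List.mem_cons.mp hj with h | h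
            · exact h ▸ lt_of_lt_of_le hlt' hda
            · exact hm4 j h hjp

-- under Pre_ (n ≠ 0 branch), A's fold lands on the Best element
lemma A_best (x : Int) (p : List Int)
    (h : ∃ i ∈ PySem.List.pyRange 1 101 1, i ∉ p ∧ |x - i| < 200) :
    ∃ m, ((PySem.List.pyRange 1 101 1).foldl (stepA x p) (200, none)).2 = some m ∧
      BestN x p m := by
  obtain ⟨i, hi, hip, hid⟩ := h
  obtain ⟨⟨h1, h2⟩, _, h4⟩ :=
    foldA_char x p (PySem.List.pyRange 1 101 1) 200 none _ rfl
  set res := (PySem.List.pyRange 1 101 1).foldl (stepA x p) (200, none) with hres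
  have hlt : res.1 < 200 := lt_of_le_of_lt (h2 i hi hip) hid
  obtain ⟨l1, m, l2, hsplit, hm1, hm2, hm3, hm4⟩ := h4 hlt
  have hmmem : m ∈ PySem.List.pyRange 1 101 1 := by rw [hsplit]; simp
  have hmrange := (PySem.List.mem_pyRange_one).mp hmmem
  refine ⟨m, hm3, hmrange.1, by omega, hm1, hm2 ▸ hlt, ?_⟩
  intro j hj1 hj2 hjp
  have hjmem : j ∈ PySem.List.pyRange 1 101 1 := PySem.List.mem_pyRange_one.mpr ⟨hj1, by omega⟩
  rw [hsplit] at hjmem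
  rcases List.mem_append.mp hjmem with hjl1 | hjrest
  · exact Or.inl (hm2 ▸ hm4 j hjl1 hjp)
  · rcases List.mem_cons.mp hjrest with rfl | hjl2
    · exact Or.inr ⟨rfl, le_refl _⟩
    · have hle : res.1 ≤ |x - j| := h2 j (hsplit ▸ hjmem) hjp
      rcases lt_or_eq_of_le hle with h | h
      · exact Or.inl (hm2 ▸ h)
      · refine Or.inr ⟨hm2 ▸ h, ?_⟩
        have hpw : (PySem.List.pyRange 1 101 1).Pairwise (· < ·) :=
          PySem.List.pairwise_lt_pyRange_one 1 101
        rw [hsplit] at hpw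
        have := (List.pairwise_append.mp hpw).2
        have hmj : m < j := (List.pairwise_cons.mp this.1).1 j hjl2
        exact le_of_lt hmj

lemma findSome_first {α β : Type} (f : α → Option β) :
    ∀ (l1 : List α) (a : α) (l2 : List α), (∀ d ∈ l1, f d = none) → ∀ v, f a = some v →
    ((l1 ++ a :: l2).findSome? f) = some v := by
  intro l1
  induction l1 with
  | nil => intro a l2 _ v ha; simp [ha]
  | cons b l1 ih =>
      intro a l2 hnone v ha
      have hb : f b = none := hnone b (by simp)
      simpa [List.findSome?, hb] using ih a l2 (fun d hd => hnone d (by simp [hd])) v ha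

-- B's outward search also lands on the Best element
lemma B_best (x : Int) (p : List Int) (m : Int) (hB : BestN x p m) :
    (PySem.List.pyRange 0 200 1).findSome? (tryAtB x p) = some m := by
  obtain ⟨hm1, hm2, hmp, hmd, hmin⟩ := hB
  have hD0 : (0 : Int) ≤ |x - m| := abs_nonneg _
  have hsplit : PySem.List.pyRange 0 200 1 =
      PySem.List.pyRange 0 (|x - m|) 1 ++ |x - m| :: PySem.List.pyRange (|x - m| + 1) 200 1 := by
    rw [PySem.List.pyRange_one_append 0 (|x - m|) 200 hD0 (le_of_lt hmd),
        PySem.List.pyRange_one_cons hmd]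
  rw [hsplit]
  apply findSome_first
  · -- for d < |x - m| both candidates are inadmissible (minimality)
    intro d hd
    obtain ⟨hd0, hdD⟩ := PySem.List.mem_pyRange_one.mp hd
    unfold tryAtB
    split_ifs with h1 h2
    · exfalso
      obtain ⟨ha, hb, hc⟩ := h1
      have habs : |x - (x - d)| = d := by
        rw [show x - (x - d) = d by ring]; exact abs_of_nonneg hd0
      rcases hmin (x - d) ha hb hc with h | ⟨h, _⟩ <;> omega
    · exfalso
      obtain ⟨ha, hb, hc⟩ := h2
      have habs : |x - (x + d)| = d := by
        rw [show x - (x + d) = -d by ring]; rw [abs_neg]; exact abs_of_nonneg hd0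
      rcases hmin (x + d) ha hb hc with h | ⟨h, _⟩ <;> omega
    · rfl
  · -- at distance |x - m| the first admissible side is exactly m
    have hcases : m = x - |x - m| ∨ m = x + |x - m| := by
      rcases abs_cases (x - m) with ⟨h, _⟩ | ⟨h, _⟩
      · left; omega
      · right; omega
    unfold tryAtB
    split_ifs with h1 h2
    · rcases hcases with hm | hm
      · exact congrArg some hm.symm
      · -- m = x + |x-m| but x - |x-m| admissible: minimality forces |x-m| = 0
        obtain ⟨ha, hb, hc⟩ := h1
        have habs : |x - (x - |x - m|)| = |x - m| := by
          rw [show x - (x - |x - m|) = |x - m| by ring]; exact abs_of_nonneg hD0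
        have hmeq : m = x - |x - m| := by
          rcases hmin (x - |x - m|) ha hb hc with h | ⟨_, h⟩ <;> omega
        exact congrArg some hmeq.symm
    · rcases hcases with hm | hm
      · exact absurd ⟨by omega, by omega, by rw [← hm]; exact hmp⟩ h1
      · exact congrArg some hm.symm
    · exfalso
      rcases hcases with hm | hm
      · exact h1 ⟨by omega, by omega, by rw [← hm]; exact hmp⟩
      · exact h2 ⟨by omega, by omega, by rw [← hm]; exact hmp⟩

-- ===== VERDICT (by name: the statement is the Claim_ definition above) =====
theorem get_nearest_number_spec : Claim_equal_get_nearest_number := by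
  intro x n p _ hpre
  unfold Spec_get_nearest_number get_nearest_number get_nearest_number_alt
  by_cases hn : n = 0
  · simp [hn]
  · simp only [hn, if_false]
    rcases hpre with h | h
    · exact absurd h hn
    · obtain ⟨m, hA, hB⟩ := A_best x p h
      rw [hA, B_best x p m hB]
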